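-- pv_equiv track=rewrite | github.com/ladokp/aoc2022 | solution/aoc_day_12.py | _parse
-- ===== SOURCE A (Python) =====
-- def _parse(puzzle_input):
--     """Parse input"""
--     s_x, s_y = -1, -1
--     e_x, e_y = -1, -1
--     board = []
--     for row_index, row in enumerate(puzzle_input.split("\n")):
--         vals = []
--         for col_index, col in enumerate(row):
--             match col:
--                 case "S":
--                     height = 0
--                     s_x, s_y = row_index, col_index
--                 case "E":
--                     height = 25
--                     e_x, e_y = row_index, col_index
--                 case _:
--                     height = ord(col) - ord("a")
--             vals.append(height)
--         board.append(vals)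
--     return board, (s_x, s_y), (e_x, e_y)
-- ===== SOURCE B (Python) =====
-- HEIGHTS = {"S": 0, "E": 25}
--
--
-- def _parse(puzzle_input):
--     """Parse input"""
--     rows = puzzle_input.split("\n")
--     board = [[HEIGHTS.get(c, ord(c) - ord("a")) for c in row] for row in rows]
--     start = end = (-1, -1)
--     for i, row in enumerate(rows):
--         for j, c in enumerate(row):
--             if c == "S":
--                 start = (i, j)
--             elif c == "E":
--                 end = (i, j)
--     return board, start, end
-- ===== Notes on version B (the rewrite author's own statement) =====
-- stated objective: simpler
-- what changed: Splits A's single stateful nested loop into two independent passes: the board as a nested comprehension with the special heights in a module-level dict, and a separate plain scan that records the start/end coordinates.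
import Mathlib
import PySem

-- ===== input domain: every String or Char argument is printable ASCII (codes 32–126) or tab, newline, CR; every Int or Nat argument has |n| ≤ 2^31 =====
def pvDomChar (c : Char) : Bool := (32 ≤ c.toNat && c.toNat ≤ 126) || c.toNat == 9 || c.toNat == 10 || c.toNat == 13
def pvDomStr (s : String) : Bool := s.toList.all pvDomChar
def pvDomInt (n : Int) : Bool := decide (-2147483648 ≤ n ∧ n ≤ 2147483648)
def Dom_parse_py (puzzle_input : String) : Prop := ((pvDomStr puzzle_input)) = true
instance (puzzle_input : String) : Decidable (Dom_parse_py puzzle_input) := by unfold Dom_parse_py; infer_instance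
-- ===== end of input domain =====

-- B is simpler: two independent passes (board by a nested comprehension with a height table, positions by a plain scan) instead of one stateful loop threading everything.

-- ===== PORT A =====
-- literal transliteration of A: one nested loop threading (s, e, board) through every cell
def parse_py (puzzle_input : String) : List (List Int) × (Int × Int) × (Int × Int) :=
  let st :=
    (PySem.List.enumerate (PySem.Chars.splitOn puzzle_input.toList ['\n'])).foldl
      (fun (st : (Int × Int) × (Int × Int) × List (List Int)) p =>
        let inner :=
          (PySem.List.enumerate p.2).foldl
            (fun (st2 : (Int × Int) × (Int × Int) × List Int) q =>
              if q.2 = 'S' then ((p.1, q.1), st2.2.1, st2.2.2 ++ [(0 : Int)])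
              else if q.2 = 'E' then (st2.1, (p.1, q.1), st2.2.2 ++ [(25 : Int)])
              else (st2.1, st2.2.1, st2.2.2 ++ [(q.2.toNat : Int) - 97]))
            (st.1, st.2.1, ([] : List Int))
        (inner.1, inner.2.1, st.2.2 ++ [inner.2.2]))
      (((-1, -1) : Int × Int), ((-1, -1) : Int × Int), ([] : List (List Int)))
  (st.2.2, st.1, st.2.1)

-- ===== PORT B =====
def pvHEIGHTS : PySem.Dict Char Int := PySem.Dict.ofList [('S', 0), ('E', 25)]

def parse_py_alt (puzzle_input : String) : List (List Int) × (Int × Int) × (Int × Int) :=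
  let rows := PySem.Chars.splitOn puzzle_input.toList ['\n']
  let board := rows.map (fun r => r.map (fun c => pvHEIGHTS.getD c ((c.toNat : Int) - 97)))
  let pos :=
    (PySem.List.enumerate rows).foldl
      (fun (se : (Int × Int) × (Int × Int)) p =>
        (PySem.List.enumerate p.2).foldl
          (fun (se : (Int × Int) × (Int × Int)) q =>
            if q.2 = 'S' then ((p.1, q.1), se.2)
            else if q.2 = 'E' then (se.1, (p.1, q.1))
            else se)
          se)
      (((-1, -1) : Int × Int), ((-1, -1) : Int × Int))
  (board, pos.1, pos.2)

-- ===== PRECONDITION & SPEC =====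
def Spec_parse_py (puzzle_input : String) (out : List (List Int) × (Int × Int) × (Int × Int)) : Prop := out = parse_py_alt puzzle_input
instance (puzzle_input : String) (out : List (List Int) × (Int × Int) × (Int × Int)) : Decidable (Spec_parse_py puzzle_input out) := by unfold Spec_parse_py; infer_instance

-- ===== CLAIM (what is proved, stated in full; the proofs are below) =====
def Claim_equal_parse_py : Prop := ∀ (puzzle_input : String), Dom_parse_py puzzle_input → Spec_parse_py puzzle_input (parse_py puzzle_input)

-- ===== LEMMAS AND PROOFS =====

def pvHeight (c : Char) : Int :=
  if c = 'S' then 0 else if c = 'E' then 25 else (c.toNat : Int) - 97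

theorem pvHeight_eq (c : Char) : pvHEIGHTS.getD c ((c.toNat : Int) - 97) = pvHeight c := by
  have hm : pvHEIGHTS = PySem.Dict.mk [('S', 0), ('E', 25)] := by decide
  by_cases hS : c = 'S'
  · simp [hm, hS, pvHeight, PySem.Dict.getD_eq_get?_getD, PySem.Dict.get?_mk_cons]
  · by_cases hE : c = 'E'
    · simp [hm, hE, pvHeight, PySem.Dict.getD_eq_get?_getD, PySem.Dict.get?_mk_cons]
    · have h1 : ('S' == c) = false := by simp [Ne.symm hS]
      have h2 : ('E' == c) = false := by simp [Ne.symm hE]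
      simp [hm, hS, hE, pvHeight, PySem.Dict.getD_eq_get?_getD, h1, h2, PySem.Dict.get?]

-- the cells of row r (index i), column indices starting at j
def pvRowCells (i : Int) (r : List Char) (j : Int) : List (Int × Int × Char) :=
  (PySem.List.enumerate r j).map (fun q => (i, q.1, q.2))

-- "keep the last match" as a fold over cells, characterising both loops' accumulator updates
def pvUpd (m : Char) (a : Int × Int) (l : List (Int × Int × Char)) : Int × Int :=
  l.foldl (fun a t => if t.2.2 = m then (t.1, t.2.1) else a) a

theorem pvUpd_append (m : Char) (a : Int × Int) (l1 l2 : List (Int × Int × Char)) :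
    pvUpd m a (l1 ++ l2) = pvUpd m (pvUpd m a l1) l2 := by
  simp [pvUpd, List.foldl_append]

-- A's inner loop over one row, with arbitrary accumulators, in closed form
theorem pvInner (i : Int) (cs : List Char) (j : Int) (s e : Int × Int) (b : List Int) :
    (PySem.List.enumerate cs j).foldl
      (fun (st2 : (Int × Int) × (Int × Int) × List Int) q =>
        if q.2 = 'S' then ((i, q.1), st2.2.1, st2.2.2 ++ [(0 : Int)])
        else if q.2 = 'E' then (st2.1, (i, q.1), st2.2.2 ++ [(25 : Int)])
        else (st2.1, st2.2.1, st2.2.2 ++ [(q.2.toNat : Int) - 97]))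
      (s, e, b)
    = (pvUpd 'S' s (pvRowCells i cs j),
       pvUpd 'E' e (pvRowCells i cs j),
       b ++ cs.map pvHeight) := by
  induction cs generalizing j s e b with
  | nil => simp [PySem.List.enumerate_nil, pvRowCells, pvUpd]
  | cons c cs ih =>
    rw [pvRowCells, PySem.List.enumerate_cons]
    by_cases hS : c = 'S'
    · simp [List.foldl_cons, hS, ih, pvUpd, pvHeight, pvRowCells]
    · by_cases hE : c = 'E'
      · simp [List.foldl_cons, hE, ih, pvUpd, pvHeight, pvRowCells]
      · simp [List.foldl_cons, hS, hE, ih, pvUpd, pvHeight, pvRowCells]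

-- A's outer loop body in closed form
def pvStep (st : (Int × Int) × (Int × Int) × List (List Int)) (p : Int × List Char) :
    (Int × Int) × (Int × Int) × List (List Int) :=
  (pvUpd 'S' st.1 (pvRowCells p.1 p.2 0),
   pvUpd 'E' st.2.1 (pvRowCells p.1 p.2 0),
   st.2.2 ++ [p.2.map pvHeight])

theorem pvStep_eq :
    (fun (st : (Int × Int) × (Int × Int) × List (List Int)) p =>
      let inner :=
        (PySem.List.enumerate p.2).foldl
          (fun (st2 : (Int × Int) × (Int × Int) × List Int) q =>
            if q.2 = 'S' then ((p.1, q.1), st2.2.1, st2.2.2 ++ [(0 : Int)])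
            else if q.2 = 'E' then (st2.1, (p.1, q.1), st2.2.2 ++ [(25 : Int)])
            else (st2.1, st2.2.1, st2.2.2 ++ [(q.2.toNat : Int) - 97]))
          (st.1, st.2.1, ([] : List Int))
      (inner.1, inner.2.1, st.2.2 ++ [inner.2.2]))
    = pvStep := by
  funext st p
  simp [pvInner p.1 p.2 0 st.1 st.2.1 [], pvStep]

def pvCellsFrom (rows : List (List Char)) (k : Int) : List (Int × Int × Char) :=
  (PySem.List.enumerate rows k).flatMap (fun p => pvRowCells p.1 p.2 0)

-- A's outer loop, with arbitrary accumulators, in closed form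
theorem pvOuter (rows : List (List Char)) (k : Int) (s e : Int × Int) (b : List (List Int)) :
    (PySem.List.enumerate rows k).foldl pvStep (s, e, b)
    = (pvUpd 'S' s (pvCellsFrom rows k),
       pvUpd 'E' e (pvCellsFrom rows k),
       b ++ rows.map (fun r => r.map pvHeight)) := by
  induction rows generalizing k s e b with
  | nil => simp [PySem.List.enumerate_nil, pvCellsFrom, pvUpd]
  | cons r rows ih =>
    rw [pvCellsFrom, PySem.List.enumerate_cons, List.flatMap_cons, List.foldl_cons]
    simp only [pvStep, ih, pvUpd_append, pvCellsFrom]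
    simp

-- B's inner position loop over one row, in closed form
theorem pvInnerB (i : Int) (cs : List Char) (j : Int) (se : (Int × Int) × (Int × Int)) :
    (PySem.List.enumerate cs j).foldl
      (fun (se : (Int × Int) × (Int × Int)) q =>
        if q.2 = 'S' then ((i, q.1), se.2)
        else if q.2 = 'E' then (se.1, (i, q.1))
        else se)
      se
    = (pvUpd 'S' se.1 (pvRowCells i cs j), pvUpd 'E' se.2 (pvRowCells i cs j)) := by
  induction cs generalizing j se with
  | nil => simp [PySem.List.enumerate_nil, pvRowCells, pvUpd]
  | cons c cs ih =>
    rw [pvRowCells, PySem.List.enumerate_cons]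
    by_cases hS : c = 'S'
    · simp [List.foldl_cons, hS, ih, pvUpd, pvRowCells]
    · by_cases hE : c = 'E'
      · simp [List.foldl_cons, hE, ih, pvUpd, pvRowCells]
      · simp [List.foldl_cons, hS, hE, ih, pvUpd, pvRowCells]

-- B's outer position loop, in closed form
theorem pvOuterB (rows : List (List Char)) (k : Int) (se : (Int × Int) × (Int × Int)) :
    (PySem.List.enumerate rows k).foldl
      (fun (se : (Int × Int) × (Int × Int)) p =>
        (PySem.List.enumerate p.2).foldl
          (fun (se : (Int × Int) × (Int × Int)) q =>
            if q.2 = 'S' then ((p.1, q.1), se.2)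
            else if q.2 = 'E' then (se.1, (p.1, q.1))
            else se)
          se)
      se
    = (pvUpd 'S' se.1 (pvCellsFrom rows k), pvUpd 'E' se.2 (pvCellsFrom rows k)) := by
  induction rows generalizing k se with
  | nil => simp [PySem.List.enumerate_nil, pvCellsFrom, pvUpd]
  | cons r rows ih =>
    rw [pvCellsFrom, PySem.List.enumerate_cons, List.flatMap_cons, List.foldl_cons]
    show (PySem.List.enumerate rows (k+1)).foldl _
      ((PySem.List.enumerate r 0).foldl _ se) = _
    rw [pvInnerB k r 0 se, ih]
    simp [pvUpd_append, pvCellsFrom]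

-- ===== VERDICT (by name: the statement is the Claim_ definition above) =====
theorem parse_py_spec : Claim_equal_parse_py := by
  intro s _
  show parse_py s = parse_py_alt s
  unfold parse_py parse_py_alt
  rw [pvStep_eq, pvOuter]
  simp only [pvOuterB]
  simp [pvHeight_eq]
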